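-- pv_equiv track=rewrite | github.com/luckydut97/Algorithm_Study | PyPy3/백준/Gold/1034. 램프/램프.py | max_lit_rows
-- ===== SOURCE A (Python) =====
-- def max_lit_rows(N, M, lamp_rows, K):
--     row_dict = {}  # 같은 행 패턴을 저장 딕셔너리
--     max_count = 0  # 최대 행 개수
--
--     for row in lamp_rows:
--         row_str = "".join(row)  # 리스트 > 문자열 변환
--         zero_count = row_str.count('0')  # 0 개수 카운팅
--
--         # 0 개수 조건 확인 (K 이하 & 홀짝성 일치)
--         if zero_count <= K and (K - zero_count) % 2 == 0:
--             # 해당 패턴의 개수 증가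
--             if row_str in row_dict:
--                 row_dict[row_str] += 1
--             else:
--                 row_dict[row_str] = 1
--
--             # 최대값 갱신
--             max_count = max(max_count, row_dict[row_str])
--
--     return max_count
-- ===== SOURCE B (Python) =====
-- def max_lit_rows(N, M, lamp_rows, K):
--     # Sort the joined row patterns so equal patterns become adjacent, then scan
--     # runs: the answer is the longest run whose pattern satisfies the
--     # zero-count/parity condition. No dictionary is ever built.
--     strs = sorted("".join(row) for row in lamp_rows)
--     best = 0
--     run = 0
--     prev = None
--     for s in strs:
--         run = run + 1 if s == prev else 1
--         prev = s
--         z = s.count('0')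
--         if run > best and z <= K and (K - z) % 2 == 0:
--             best = run
--     return best
-- ===== Notes on version B (the rewrite author's own statement) =====
-- stated objective: alternative
-- what changed: B sorts the joined row patterns so equal patterns become adjacent and then scans runs of adjacent equal strings, returning the longest run whose pattern passes the zero-count/parity test; it builds no dictionary at all, unlike A's per-row dict counting with a running max.
import Mathlib
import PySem

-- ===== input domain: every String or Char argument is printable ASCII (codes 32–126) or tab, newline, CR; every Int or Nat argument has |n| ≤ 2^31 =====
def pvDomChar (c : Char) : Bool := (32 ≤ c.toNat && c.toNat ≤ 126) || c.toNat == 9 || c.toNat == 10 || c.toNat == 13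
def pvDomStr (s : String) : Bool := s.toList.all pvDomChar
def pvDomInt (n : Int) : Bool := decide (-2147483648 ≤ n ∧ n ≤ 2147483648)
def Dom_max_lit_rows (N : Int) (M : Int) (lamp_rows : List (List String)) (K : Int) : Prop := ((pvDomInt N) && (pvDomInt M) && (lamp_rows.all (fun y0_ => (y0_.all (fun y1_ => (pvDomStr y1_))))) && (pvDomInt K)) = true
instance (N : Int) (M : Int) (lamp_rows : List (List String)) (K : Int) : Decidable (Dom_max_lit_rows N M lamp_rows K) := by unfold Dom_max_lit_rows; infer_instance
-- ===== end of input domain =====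

-- B sorts the joined row patterns and scans runs of adjacent equal patterns instead of
-- counting with a dictionary (objective: alternative algorithm, sort-then-scan, no dict).

-- ===== PORT A =====
def max_lit_rows (N : Int) (M : Int) (lamp_rows : List (List String)) (K : Int) : Int :=
  (lamp_rows.foldl
    (fun (st : PySem.Dict String Int × Int) row =>
      let row_str := PySem.Str.join "" row
      let zero_count : Int := (PySem.Str.count row_str "0" : Int)
      if zero_count ≤ K ∧ PySem.Int.mod (K - zero_count) 2 = 0 then
        let d := if st.1.contains row_str then st.1.insert row_str (st.1.getD row_str 0 + 1)
                 else st.1.insert row_str 1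
        (d, max st.2 (d.getD row_str 0))
      else st)
    (PySem.Dict.empty, 0)).2

-- ===== PORT B =====
-- state: (best, run, prev), exactly Source B's three loop variables
def max_lit_rows_alt (N : Int) (M : Int) (lamp_rows : List (List String)) (K : Int) : Int :=
  let strs := PySem.List.sorted (lamp_rows.map (fun row => PySem.Str.join "" row)) (fun s => s) false
  (strs.foldl
    (fun (st : Int × Int × Option String) s =>
      let run : Int := if some s = st.2.2 then st.2.1 + 1 else 1
      let z : Int := (PySem.Str.count s "0" : Int)
      let best : Int := if run > st.1 ∧ z ≤ K ∧ PySem.Int.mod (K - z) 2 = 0 then run else st.1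
      (best, run, some s))
    (0, 0, none)).1

-- ===== PRECONDITION & SPEC =====
def Spec_max_lit_rows (N : Int) (M : Int) (lamp_rows : List (List String)) (K : Int) (out : Int) : Prop := out = max_lit_rows_alt N M lamp_rows K
instance (N : Int) (M : Int) (lamp_rows : List (List String)) (K : Int) (out : Int) : Decidable (Spec_max_lit_rows N M lamp_rows K out) := by unfold Spec_max_lit_rows; infer_instance

-- ===== CLAIM (what is proved, stated in full; the proofs are below) =====
def Claim_equal_max_lit_rows : Prop := ∀ (N : Int) (M : Int) (lamp_rows : List (List String)) (K : Int), Dom_max_lit_rows N M lamp_rows K → Spec_max_lit_rows N M lamp_rows K (max_lit_rows N M lamp_rows K)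

-- ===== LEMMAS AND PROOFS =====

/-- the qualifying condition, as a Bool predicate on a pattern -/
def pvOk (K : Int) (s : String) : Bool :=
  decide ((PySem.Str.count s "0" : Int) ≤ K ∧
    PySem.Int.mod (K - (PySem.Str.count s "0" : Int)) 2 = 0)

/-- max of the per-distinct-pattern counts of `q` (0 if `q` is empty). -/
def pvSpec (q : List String) : Int :=
  Finset.fold max 0 (fun k => (q.count k : Int)) q.toFinset

theorem pvSpec_nonneg (q : List String) : 0 ≤ pvSpec q :=
  (Finset.le_fold_max 0).mpr (Or.inl le_rfl)

theorem pvFold_max_init (f : String → Int) (t : Finset String) (b c : Int) :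
    Finset.fold max (max b c) f t = max c (Finset.fold max b f t) := by
  apply le_antisymm
  · rw [Finset.fold_max_le]
    refine ⟨max_le (le_max_of_le_right ((Finset.le_fold_max b).mpr (Or.inl le_rfl))) (le_max_left _ _), ?_⟩
    intro x hx
    exact le_max_of_le_right ((Finset.le_fold_max _).mpr (Or.inr ⟨x, hx, le_rfl⟩))
  · rw [max_le_iff]
    refine ⟨(Finset.le_fold_max c).mpr (Or.inl (le_max_right b c)), ?_⟩
    rw [Finset.fold_max_le]
    exact ⟨(Finset.le_fold_max b).mpr (Or.inl (le_max_left b c)),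
      fun x hx => (Finset.le_fold_max _).mpr (Or.inr ⟨x, hx, le_rfl⟩)⟩

theorem pvFold_absorb (f : String → Int) (t : Finset String) (b c : Int)
    (h : c ≤ Finset.fold max b f t) :
    Finset.fold max (max b c) f t = Finset.fold max b f t := by
  rw [pvFold_max_init]; exact max_eq_right h

theorem pvMem_le_fold (f : String → Int) (t : Finset String) (b : Int)
    {x : String} (hx : x ∈ t) : f x ≤ Finset.fold max b f t :=
  (Finset.le_fold_max (f x)).mpr (Or.inr ⟨x, hx, le_rfl⟩)

theorem pvSpec_append (q : List String) (s : String) :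
    pvSpec (q ++ [s]) = max (pvSpec q) ((q.count s : Int) + 1) := by
  classical
  unfold pvSpec
  have htf : (q ++ [s]).toFinset = insert s q.toFinset := by
    simp [List.toFinset_append]
  have hcnt : ∀ k : String, ((q ++ [s]).count k : Int)
      = (q.count k : Int) + (if k = s then 1 else 0) := by
    intro k
    by_cases h : k = s
    · simp [h, List.count_append]
    · simp [h, Ne.symm h, List.count_append]
  by_cases hs : s ∈ q.toFinset
  · rw [htf, Finset.insert_eq_self.mpr hs]
    apply le_antisymm
    · rw [Finset.fold_max_le]
      refine ⟨le_max_of_le_left (pvSpec_nonneg q), ?_⟩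
      intro x hx
      rw [hcnt x]
      by_cases hxs : x = s
      · subst hxs
        exact le_max_of_le_right (by simp)
      · simp only [if_neg hxs, add_zero]
        exact le_max_of_le_left ((Finset.le_fold_max _).mpr (Or.inr ⟨x, hx, le_rfl⟩))
    · rw [max_le_iff]
      constructor
      · rw [Finset.fold_max_le]
        refine ⟨(Finset.le_fold_max 0).mpr (Or.inl le_rfl), ?_⟩
        intro x hx
        refine le_trans ?_ ((Finset.le_fold_max _).mpr (Or.inr ⟨x, hx, le_rfl⟩))
        rw [hcnt x]
        split_ifs <;> omega
      · refine le_trans ?_ ((Finset.le_fold_max _).mpr (Or.inr ⟨s, hs, le_rfl⟩))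
        rw [hcnt s, if_pos rfl]
  · have hsq : s ∉ q := fun h => hs (List.mem_toFinset.mpr h)
    rw [htf, Finset.fold_insert hs]
    rw [Finset.fold_congr (g := fun k => (q.count k : Int)) ?hg]
    case hg =>
      intro x hx
      rw [hcnt x, if_neg, add_zero]
      intro hxs; exact hs (hxs ▸ hx)
    rw [hcnt s, if_pos rfl, List.count_eq_zero.mpr hsq]
    simp [max_comm]

theorem pvA_loop : ∀ (ss q : List String),
    (ss.foldl
      (fun (st : PySem.Dict String Int × Int) s =>
        let d := if st.1.contains s then st.1.insert s (st.1.getD s 0 + 1)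
                 else st.1.insert s 1
        (d, max st.2 (d.getD s 0)))
      (PySem.Dict.counter q, pvSpec q)).2 = pvSpec (q ++ ss) := by
  intro ss
  induction ss with
  | nil => intro q; simp
  | cons s ss ih =>
    intro q
    have hins : (if (PySem.Dict.counter q).contains s then
          (PySem.Dict.counter q).insert s ((PySem.Dict.counter q).getD s 0 + 1)
        else (PySem.Dict.counter q).insert s 1) = PySem.Dict.counter (q ++ [s]) := by
      rw [← PySem.Dict.foldl_insert_getD_add_one_eq_counter (q ++ [s]), List.foldl_append]
      simp only [List.foldl_cons, List.foldl_nil,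
        PySem.Dict.foldl_insert_getD_add_one_eq_counter]
      by_cases hc : (PySem.Dict.counter q).contains s = true
      · rw [if_pos hc]
      · have hsq : s ∉ q := by
          rw [PySem.Dict.contains_counter] at hc
          simpa using hc
        rw [if_neg hc, PySem.Dict.getD_counter, List.count_eq_zero.mpr hsq]
        norm_num
    rw [List.foldl_cons]
    simp only [hins]
    rw [PySem.Dict.getD_counter]
    have hm : max (pvSpec q) (((q ++ [s]).count s : Nat) : Int) = pvSpec (q ++ [s]) := by
      rw [pvSpec_append]
      congr 1
      rw [List.count_append]
      push_cast
      simp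
    rw [hm]
    have h2 := ih (q ++ [s])
    rw [List.append_assoc] at h2
    exact h2

/-- B's loop step, abstracted over K. -/
def pvStep (K : Int) (st : Int × Int × Option String) (s : String) : Int × Int × Option String :=
  let run : Int := if some s = st.2.2 then st.2.1 + 1 else 1
  let z : Int := (PySem.Str.count s "0" : Int)
  let best : Int := if run > st.1 ∧ z ≤ K ∧ PySem.Int.mod (K - z) 2 = 0 then run else st.1
  (best, run, some s)

theorem pvStep_best (K : Int) (st : Int × Int × Option String) (s : String) :
    (pvStep K st s).1 =
      (if pvOk K s = true then max st.1 (if some s = st.2.2 then st.2.1 + 1 else 1) else st.1) := by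
  have h0 : (pvStep K st s).1 =
      if ((if some s = st.2.2 then st.2.1 + 1 else 1) > st.1 ∧
          (PySem.Str.count s "0" : Int) ≤ K ∧
          PySem.Int.mod (K - (PySem.Str.count s "0" : Int)) 2 = 0) then
        (if some s = st.2.2 then st.2.1 + 1 else 1)
      else st.1 := rfl
  rw [h0]
  by_cases hP : ((PySem.Str.count s "0" : Int) ≤ K ∧
      PySem.Int.mod (K - (PySem.Str.count s "0" : Int)) 2 = 0)
  · have hd : pvOk K s = true := by unfold pvOk; exact decide_eq_true hP
    rw [if_pos hd]
    by_cases hgt : st.1 < (if some s = st.2.2 then st.2.1 + 1 else 1)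
    · rw [if_pos ⟨hgt, hP⟩, max_eq_right hgt.le]
    · rw [if_neg (fun hc => hgt hc.1), max_eq_left (not_lt.mp hgt)]
  · have hd : pvOk K s = false := by unfold pvOk; exact decide_eq_false hP
    rw [if_neg (fun hc => hP hc.2), if_neg (by rw [hd]; exact Bool.false_ne_true)]

/-- run-scan invariant on a sorted tail: the final `best` is the max, over the
qualifying distinct patterns of `t`, of their count in `t` plus the pending run
if the pattern continues `prev`. -/
theorem pvB_loop (K : Int) : ∀ (t : List String) (p : Option String) (run best : Int),
    t.Pairwise (· ≤ ·) → (∀ x ∈ t, ∀ q, p = some q → q ≤ x) →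
    (t.foldl (pvStep K) (best, run, p)).1
      = Finset.fold max best
          (fun x => (t.count x : Int) + if p = some x then run else 0)
          (t.toFinset.filter (fun x => pvOk K x = true)) := by
  classical
  intro t
  induction t with
  | nil => intro p run best _ _; simp
  | cons s t ih =>
    intro p run best hpair hlow
    have hpt : t.Pairwise (· ≤ ·) := hpair.of_cons
    have hst : ∀ x ∈ t, s ≤ x := fun x hx => (List.pairwise_cons.mp hpair).1 x hx
    have hlow' : ∀ x ∈ t, ∀ q, (some s : Option String) = some q → q ≤ x := by
      intro x hx q hq; cases hq; exact hst x hx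
    rw [List.foldl_cons]
    set run' : Int := if some s = p then run + 1 else 1 with hrun'
    set best' : Int := if pvOk K s = true then max best run' else best with hbest'
    have hstep : pvStep K (best, run, p) s = (best', run', (some s : Option String)) := by
      have h2 := pvStep_best K (best, run, p) s
      have h3 : (pvStep K (best, run, p) s).2 = (run', (some s : Option String)) := rfl
      calc pvStep K (best, run, p) s
          = ((pvStep K (best, run, p) s).1, (pvStep K (best, run, p) s).2) := rfl
        _ = (best', run', (some s : Option String)) := by rw [h2, h3]
    rw [hstep, ih _ _ _ hpt hlow']
    -- normalize the contribution function on the left-hand fold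
    have hgL : ∀ x ∈ t.toFinset.filter (fun x => pvOk K x = true),
        ((t.count x : Int) + if (some s : Option String) = some x then run' else 0)
          = (t.count x : Int) + (if x = s then run' else 0) := by
      intro x _
      by_cases hxs : x = s
      · subst hxs; rw [if_pos rfl, if_pos rfl]
      · have hns : ¬ ((some s : Option String) = some x) := fun h => hxs ((Option.some.inj h).symm)
        rw [if_neg hns, if_neg hxs]
    rw [Finset.fold_congr hgL]
    -- normalize the contribution function on the right-hand fold
    have hgen : ∀ x ∈ (s :: t).toFinset.filter (fun x => pvOk K x = true),
        (((s :: t).count x : Int) + if p = some x then run else 0)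
          = (t.count x : Int) + (if x = s then run' else 0) := by
      intro x hx
      have hx' : x ∈ s :: t := List.mem_toFinset.mp (Finset.mem_filter.mp hx).1
      have hc : ((s :: t).count x : Int) = (t.count x : Int) + (if x = s then 1 else 0) := by
        by_cases hxs : x = s
        · subst hxs; simp
        · simp [List.count_cons, hxs]
          exact fun h => hxs h.symm
      by_cases hxs : x = s
      · subst hxs
        rw [hc, if_pos rfl, if_pos rfl, hrun']
        by_cases hp : (p : Option String) = some x
        · rw [if_pos hp, if_pos hp.symm]; ring
        · rw [if_neg hp, if_neg (fun h => hp h.symm)]; ring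
      · have hxt : x ∈ t := by
          cases List.mem_cons.mp hx' with
          | inl h => exact absurd h hxs
          | inr h => exact h
        rw [hc, if_neg hxs, add_zero, if_neg hxs, add_zero]
        by_cases hp : p = some x
        · have h1 : x ≤ s := hlow s List.mem_cons_self x hp
          have h2 : s ≤ x := hst x hxt
          exact absurd (le_antisymm h1 h2) hxs
        · rw [if_neg hp, add_zero]
    conv_rhs => rw [Finset.fold_congr hgen]
    -- split on whether s qualifies and whether s already occurs in t
    by_cases hok : pvOk K s = true
    · have hsets : (s :: t).toFinset.filter (fun x => pvOk K x = true)
          = insert s (t.toFinset.filter (fun x => pvOk K x = true)) := by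
        ext x
        simp only [Finset.mem_filter, List.toFinset_cons, Finset.mem_insert, List.mem_toFinset]
        constructor
        · rintro ⟨h1 | h1, h2⟩
          · exact Or.inl h1
          · exact Or.inr ⟨h1, h2⟩
        · rintro (h | ⟨h1, h2⟩)
          · exact ⟨Or.inl h, h ▸ hok⟩
          · exact ⟨Or.inr h1, h2⟩
      rw [hsets, hbest', if_pos hok]
      by_cases hmem : s ∈ t
      · have hsT : s ∈ t.toFinset.filter (fun x => pvOk K x = true) :=
          Finset.mem_filter.mpr ⟨List.mem_toFinset.mpr hmem, hok⟩
        rw [Finset.insert_eq_self.mpr hsT]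
        refine pvFold_absorb _ _ _ _ ?_
        refine le_trans ?_ (pvMem_le_fold _ _ best hsT)
        rw [if_pos rfl]
        have : (0 : Int) ≤ (t.count s : Int) := by positivity
        omega
      · have hsT : s ∉ t.toFinset.filter (fun x => pvOk K x = true) := by
          simp [List.mem_toFinset, hmem]
        rw [Finset.fold_insert hsT, if_pos rfl,
          List.count_eq_zero.mpr hmem, pvFold_max_init]
        norm_num
    · have hsets : (s :: t).toFinset.filter (fun x => pvOk K x = true)
          = t.toFinset.filter (fun x => pvOk K x = true) := by
        ext x
        simp only [Finset.mem_filter, List.toFinset_cons, Finset.mem_insert, List.mem_toFinset]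
        constructor
        · rintro ⟨h1 | h1, h2⟩
          · exact absurd (h1 ▸ h2) hok
          · exact ⟨h1, h2⟩
        · rintro ⟨h1, h2⟩; exact ⟨Or.inr h1, h2⟩
      rw [hsets, hbest', if_neg hok]

/-- B's sorted run-scan computes the max per-distinct-pattern count of the qualifying patterns. -/
theorem pvB_eq (K : Int) (ks : List String) :
    ((PySem.List.sorted ks (fun s => s) false).foldl (pvStep K) (0, 0, (none : Option String))).1
      = pvSpec (ks.filter (pvOk K)) := by
  classical
  set t := PySem.List.sorted ks (fun s => s) false with ht
  have hpair : t.Pairwise (· ≤ ·) := by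
    have := PySem.List.sorted_pairwise (xs := ks) (key := fun s => s)
    simpa [ht] using this
  have hperm : t.Perm ks := PySem.List.sorted_perm ks (fun s => s) false
  rw [pvB_loop K t none 0 0 hpair (by intro x hx q hq; cases hq)]
  unfold pvSpec
  have h1 : t.toFinset = ks.toFinset := List.toFinset_eq_of_perm _ _ hperm
  have h2 : (ks.filter (pvOk K)).toFinset = ks.toFinset.filter (fun x => pvOk K x = true) := by
    rw [List.toFinset_filter]
  rw [h1, h2]
  apply Finset.fold_congr
  intro x hx
  have hok : pvOk K x = true := (Finset.mem_filter.mp hx).2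
  rw [if_neg (by simp), add_zero, hperm.count_eq, List.count_filter hok]

-- ===== VERDICT (by name: the statement is the Claim_ definition above) =====
theorem max_lit_rows_spec : Claim_equal_max_lit_rows := by
  intro N M lamp_rows K _
  unfold Spec_max_lit_rows max_lit_rows max_lit_rows_alt
  simp only []
  -- A side: fuse the per-row join into a map, turn the guarded fold into a fold over the filtered list
  rw [← List.foldl_map (f := fun row => PySem.Str.join "" row)
    (g := fun (st : PySem.Dict String Int × Int) s =>
      if (PySem.Str.count s "0" : Int) ≤ K ∧
          PySem.Int.mod (K - (PySem.Str.count s "0" : Int)) 2 = 0 then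
        let d := if st.1.contains s then st.1.insert s (st.1.getD s 0 + 1)
                 else st.1.insert s 1
        (d, max st.2 (d.getD s 0))
      else st)]
  set ks := lamp_rows.map (fun row => PySem.Str.join "" row) with hks
  rw [PySem.List.foldl_ite_eq_foldl_filter
    (p := fun s : String => (PySem.Str.count s "0" : Int) ≤ K ∧
      PySem.Int.mod (K - (PySem.Str.count s "0" : Int)) 2 = 0)
    (f := fun (st : PySem.Dict String Int × Int) s =>
      let d := if st.1.contains s then st.1.insert s (st.1.getD s 0 + 1)
               else st.1.insert s 1
      (d, max st.2 (d.getD s 0)))]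
  have hA : (PySem.Dict.empty, (0 : Int))
      = (PySem.Dict.counter ([] : List String), pvSpec []) := by
    simp [pvSpec, PySem.Dict.counter]
  rw [hA, pvA_loop, List.nil_append]
  -- B side: the loop is pvStep over the sorted list
  have hfun : (fun (st : Int × Int × Option String) s =>
      let run : Int := if some s = st.2.2 then st.2.1 + 1 else 1
      let z : Int := (PySem.Str.count s "0" : Int)
      let best : Int := if run > st.1 ∧ z ≤ K ∧ PySem.Int.mod (K - z) 2 = 0 then run else st.1
      (best, run, some s)) = pvStep K := rfl
  rw [hfun, pvB_eq]
  rfl
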